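-- pv_equiv track=rewrite | github.com/sreeram-gsan/BrowseAwareCore | BrowseAwareCore/algorithms/StateTransition.py | get_simple_state_transitions
-- ===== SOURCE A (Python) =====
-- def get_simple_state_transitions(bandwidth,percentage_b):
--     state_transitions = []
--     state_transitions_ids = []
--     current_state = "Start"
--     current_state_id = 0
--     temp_bandwidth = bandwidth[0]
--     # 0 - Start State  1 - Volatile  2 - Not Diverted  3 - Diverted
--     # What needs to be done if the bandwidth is not changing?
--     for i in range(len(bandwidth)):
--
--         if (bandwidth[i]>temp_bandwidth):
--             if (percentage_b[i]>percentage_b[i-1]):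
--                 current_state = "Diverted"
--                 current_state_id = 3
--             else:
--                 current_state = "Volatile"
--                 current_state_id = 1
--
--         if (bandwidth[i]<temp_bandwidth):
--             if (percentage_b[i]<percentage_b[i-1]):
--                 current_state = "Not Diverted"
--                 current_state_id = 2
--             else:
--                 current_state = "Volatile"
--                 current_state_id = 1
--
--         temp_bandwidth = bandwidth[i]
--         state_transitions.append(current_state)
--         state_transitions_ids.append(current_state_id)
--
--     return state_transitions,state_transitions_ids
-- ===== SOURCE B (Python) =====
-- def get_simple_state_transitions(bandwidth, percentage_b):
--     n = len(bandwidth)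
--     # Run-length view: the change points where the carried state is replaced,
--     # each as (index, state, state_id); the state is constant between them.
--     breaks = [(0, "Start", 0)]
--     for i in range(1, n):
--         if bandwidth[i] > bandwidth[i - 1]:
--             s, k = ("Diverted", 3) if percentage_b[i] > percentage_b[i - 1] else ("Volatile", 1)
--             breaks.append((i, s, k))
--         elif bandwidth[i] < bandwidth[i - 1]:
--             s, k = ("Not Diverted", 2) if percentage_b[i] < percentage_b[i - 1] else ("Volatile", 1)
--             breaks.append((i, s, k))
--     # Expand each run at once by list replication: run of (s, k) spans [i, j).
--     starts_of_next = [b[0] for b in breaks[1:]] + [n]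
--     states, ids = [], []
--     for (i, s, k), j in zip(breaks, starts_of_next):
--         states += [s] * (j - i)
--         ids += [k] * (j - i)
--     return states, ids
-- ===== Notes on version B (the rewrite author's own statement) =====
-- stated objective: alternative
-- what changed: A's per-element state machine (carrying temp_bandwidth and the leftover state into every slot) is replaced by a run-length encoding: collect only the change points (index, state, id), then expand each constant run at once by list replication [s]*(j-i); no state is carried during output construction.
import Mathlib
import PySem

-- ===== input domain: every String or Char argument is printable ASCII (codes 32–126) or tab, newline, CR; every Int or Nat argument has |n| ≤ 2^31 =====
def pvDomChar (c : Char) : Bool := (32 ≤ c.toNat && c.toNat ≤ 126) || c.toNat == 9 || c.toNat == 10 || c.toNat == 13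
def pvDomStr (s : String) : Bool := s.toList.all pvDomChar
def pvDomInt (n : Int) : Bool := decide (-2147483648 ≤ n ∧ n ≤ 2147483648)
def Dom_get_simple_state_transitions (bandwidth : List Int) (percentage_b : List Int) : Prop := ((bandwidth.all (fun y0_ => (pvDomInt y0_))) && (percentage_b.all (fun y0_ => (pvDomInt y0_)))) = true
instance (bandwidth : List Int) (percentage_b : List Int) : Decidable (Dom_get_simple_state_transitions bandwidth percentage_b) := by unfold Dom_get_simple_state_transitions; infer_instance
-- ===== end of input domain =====

-- B replaces A's per-element state machine by a run-length encoding: collect only the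
-- change points, then expand each constant run by replication (objective: alternative).

-- ===== PORT A =====
-- loop body of A: state = (temp_bandwidth, current_state, current_state_id, state_transitions, state_transitions_ids)
def pvAStep (bandwidth percentage_b : List Int)
    (st : Int × String × Int × List String × List Int) (i : Int) :
    Int × String × Int × List String × List Int :=
  let bi := PySem.List.pyGetD bandwidth i 0
  let s1 : String × Int :=
    if bi > st.1 then
      (if PySem.List.pyGetD percentage_b i 0 > PySem.List.pyGetD percentage_b (i - 1) 0
       then ("Diverted", 3) else ("Volatile", 1))
    else (st.2.1, st.2.2.1)
  let s2 : String × Int :=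
    if bi < st.1 then
      (if PySem.List.pyGetD percentage_b i 0 < PySem.List.pyGetD percentage_b (i - 1) 0
       then ("Not Diverted", 2) else ("Volatile", 1))
    else s1
  (bi, s2.1, s2.2, st.2.2.2.1 ++ [s2.1], st.2.2.2.2 ++ [s2.2])

def get_simple_state_transitions (bandwidth : List Int) (percentage_b : List Int) :
    List String × List Int :=
  let fin := (PySem.List.pyRange 0 (PySem.List.len bandwidth) 1).foldl
    (pvAStep bandwidth percentage_b)
    (PySem.List.pyGetD bandwidth 0 0, "Start", (0 : Int), ([] : List String), ([] : List Int))
  (fin.2.2.2.1, fin.2.2.2.2)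

-- ===== PORT B =====
-- body of Source B's first loop: append a change point (i, s, k) when bandwidth changes at i
def pvBreakStep (bandwidth percentage_b : List Int)
    (acc : List (Int × String × Int)) (i : Int) : List (Int × String × Int) :=
  if PySem.List.pyGetD bandwidth i 0 > PySem.List.pyGetD bandwidth (i - 1) 0 then
    acc ++ [(i, if PySem.List.pyGetD percentage_b i 0 > PySem.List.pyGetD percentage_b (i - 1) 0
                then ("Diverted", (3 : Int)) else ("Volatile", 1))]
  else if PySem.List.pyGetD bandwidth i 0 < PySem.List.pyGetD bandwidth (i - 1) 0 then
    acc ++ [(i, if PySem.List.pyGetD percentage_b i 0 < PySem.List.pyGetD percentage_b (i - 1) 0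
                then ("Not Diverted", (2 : Int)) else ("Volatile", 1))]
  else acc

-- body of Source B's second loop: states += [s]*(j-i); ids += [k]*(j-i)
def pvRunStep (acc : List String × List Int) (p : (Int × String × Int) × Int) :
    List String × List Int :=
  (acc.1 ++ List.replicate (p.2 - p.1.1).toNat p.1.2.1,
   acc.2 ++ List.replicate (p.2 - p.1.1).toNat p.1.2.2)

def get_simple_state_transitions_alt (bandwidth : List Int) (percentage_b : List Int) :
    List String × List Int :=
  let n : Int := PySem.List.len bandwidth
  let breaks := (PySem.List.pyRange 1 n 1).foldl (pvBreakStep bandwidth percentage_b)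
    [((0 : Int), "Start", (0 : Int))]
  let startsOfNext := (breaks.drop 1).map (·.1) ++ [n]
  (breaks.zip startsOfNext).foldl pvRunStep (([] : List String), ([] : List Int))

-- ===== PRECONDITION & SPEC =====
-- Pre_ excludes exactly the inputs where Python A raises IndexError: the empty
-- bandwidth list (bandwidth[0] before the loop), and percentage_b too short at an
-- index where bandwidth changes (percentage_b[i] is only read under strict > or <).
def Pre_get_simple_state_transitions (bandwidth : List Int) (percentage_b : List Int) : Prop :=
  bandwidth ≠ [] ∧
  ∀ i : Nat, i < bandwidth.length → 1 ≤ i →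
    bandwidth.getD i 0 ≠ bandwidth.getD (i - 1) 0 → i < percentage_b.length
instance (bandwidth : List Int) (percentage_b : List Int) :
    Decidable (Pre_get_simple_state_transitions bandwidth percentage_b) := by
  unfold Pre_get_simple_state_transitions; infer_instance

def pvWitness_get_simple_state_transitions : List Int × List Int := ([3, 5, 5, 2], [1, 2, 2, 1])

def Spec_get_simple_state_transitions (bandwidth : List Int) (percentage_b : List Int)
    (out : List String × List Int) : Prop :=
  out = get_simple_state_transitions_alt bandwidth percentage_b
instance (bandwidth : List Int) (percentage_b : List Int) (out : List String × List Int) :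
    Decidable (Spec_get_simple_state_transitions bandwidth percentage_b out) := by
  unfold Spec_get_simple_state_transitions; infer_instance

-- ===== CLAIM (what is proved, stated in full; the proofs are below) =====
def Claim_equal_get_simple_state_transitions : Prop := ∀ (bandwidth : List Int) (percentage_b : List Int), Dom_get_simple_state_transitions bandwidth percentage_b → Pre_get_simple_state_transitions bandwidth percentage_b → Spec_get_simple_state_transitions bandwidth percentage_b (get_simple_state_transitions bandwidth percentage_b)

-- ===== LEMMAS AND PROOFS =====

-- local label at index i (none = "no bandwidth change"); a proof-side bridge only
def pvClassify (bandwidth percentage_b : List Int) (i : Int) : Option (String × Int) :=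
  if PySem.List.pyGetD bandwidth i 0 > PySem.List.pyGetD bandwidth (i - 1) 0 then
    some (if PySem.List.pyGetD percentage_b i 0 > PySem.List.pyGetD percentage_b (i - 1) 0
          then ("Diverted", 3) else ("Volatile", 1))
  else if PySem.List.pyGetD bandwidth i 0 < PySem.List.pyGetD bandwidth (i - 1) 0 then
    some (if PySem.List.pyGetD percentage_b i 0 < PySem.List.pyGetD percentage_b (i - 1) 0
          then ("Not Diverted", 2) else ("Volatile", 1))
  else none

-- the change point emitted at i, as a (possibly empty) list
def pvOptBreak (bandwidth percentage_b : List Int) (i : Int) : List (Int × String × Int) :=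
  match pvClassify bandwidth percentage_b i with
  | none => []
  | some sk => [(i, sk.1, sk.2)]

-- forward-fill of the labels, pure form (output of A's loop from some index on)
def pvFill (cur : String × Int) : List (Option (String × Int)) → List String × List Int
  | [] => ([], [])
  | lab :: rest =>
    let c := lab.getD cur
    ((pvFill c rest).1.cons c.1, (pvFill c rest).2.cons c.2)

-- expansion of a change-point list: cur spans [i, first break), etc., up to n
def pvExpand (cur : String × Int) (i : Int) : List (Int × String × Int) → Int → List String × List Int
  | [], n => (List.replicate (n - i).toNat cur.1, List.replicate (n - i).toNat cur.2)
  | (j, s, k) :: bs, n =>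
    (List.replicate (j - i).toNat cur.1 ++ (pvExpand (s, k) j bs n).1,
     List.replicate (j - i).toNat cur.2 ++ (pvExpand (s, k) j bs n).2)

-- A's loop body at index i (temp_bandwidth = bandwidth[i-1]) is the fill step at label i
theorem pvAStep_eq_fill (bandwidth percentage_b : List Int) (i : Int)
    (cur : String × Int) (accS : List String) (accI : List Int) :
    pvAStep bandwidth percentage_b
      (PySem.List.pyGetD bandwidth (i - 1) 0, cur.1, cur.2, accS, accI) i
      = (PySem.List.pyGetD bandwidth i 0,
         ((pvClassify bandwidth percentage_b i).getD cur).1,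
         ((pvClassify bandwidth percentage_b i).getD cur).2,
         accS ++ [((pvClassify bandwidth percentage_b i).getD cur).1],
         accI ++ [((pvClassify bandwidth percentage_b i).getD cur).2]) := by
  unfold pvAStep pvClassify
  by_cases h1 : PySem.List.pyGetD bandwidth i 0 > PySem.List.pyGetD bandwidth (i - 1) 0
  · have h2 : ¬ PySem.List.pyGetD bandwidth i 0 < PySem.List.pyGetD bandwidth (i - 1) 0 := by omega
    simp [h1, h2]
  · by_cases h2 : PySem.List.pyGetD bandwidth i 0 < PySem.List.pyGetD bandwidth (i - 1) 0
    · simp [h1, h2]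
    · simp [h1, h2]

-- A's loop from index k (temp = bandwidth[k-1]) produces the forward-fill of the labels
theorem pvLoop_eq_fill (bandwidth percentage_b : List Int) :
    ∀ (m : Nat) (k : Int), 1 ≤ k → (bandwidth.length : Int) - k = m →
    ∀ (cur : String × Int) (accS : List String) (accI : List Int),
    (let A := (PySem.List.pyRange k (bandwidth.length : Int) 1).foldl
        (pvAStep bandwidth percentage_b)
        (PySem.List.pyGetD bandwidth (k - 1) 0, cur.1, cur.2, accS, accI)
     let F := pvFill cur ((PySem.List.pyRange k (bandwidth.length : Int) 1).map
        (pvClassify bandwidth percentage_b))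
     (A.2.2.2.1, A.2.2.2.2) = (accS ++ F.1, accI ++ F.2)) := by
  intro m
  induction m with
  | zero =>
    intro k hk hm cur accS accI
    rw [PySem.List.pyRange_one_eq_nil (by omega)]
    simp [pvFill]
  | succ m ih =>
    intro k hk hm cur accS accI
    rw [PySem.List.pyRange_one_cons (by omega)]
    simp only [List.map_cons, List.foldl_cons]
    rw [pvAStep_eq_fill]
    have hk1 : k + 1 - 1 = k := by omega
    have := ih (k + 1) (by omega) (by omega)
      ((pvClassify bandwidth percentage_b k).getD cur)
      (accS ++ [((pvClassify bandwidth percentage_b k).getD cur).1])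
      (accI ++ [((pvClassify bandwidth percentage_b k).getD cur).2])
    rw [hk1] at this
    rw [this]
    simp [pvFill]

-- pvBreakStep appends exactly the change point pvOptBreak emits
theorem pvBreakStep_eq_append (bandwidth percentage_b : List Int)
    (acc : List (Int × String × Int)) (i : Int) :
    pvBreakStep bandwidth percentage_b acc i
      = acc ++ pvOptBreak bandwidth percentage_b i := by
  unfold pvBreakStep pvOptBreak pvClassify
  by_cases h1 : PySem.List.pyGetD bandwidth i 0 > PySem.List.pyGetD bandwidth (i - 1) 0
  · simp [h1]
  · by_cases h2 : PySem.List.pyGetD bandwidth i 0 < PySem.List.pyGetD bandwidth (i - 1) 0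
    · simp [h1, h2]
    · simp [h1, h2]

-- every change point collected from indices ≥ a has index ≥ a
theorem pvOptBreak_mem_ge (bandwidth percentage_b : List Int) (a n : Int)
    (b : Int × String × Int)
    (hb : b ∈ (PySem.List.pyRange a n 1).flatMap (pvOptBreak bandwidth percentage_b)) :
    a ≤ b.1 := by
  rcases List.mem_flatMap.mp hb with ⟨i, hi, hbi⟩
  have hai := (PySem.List.mem_pyRange_one.mp hi).1
  unfold pvOptBreak at hbi
  cases h : pvClassify bandwidth percentage_b i with
  | none => rw [h] at hbi; simp at hbi
  | some sk =>
    rw [h] at hbi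
    simp only [List.mem_singleton] at hbi
    rw [hbi]; exact hai

theorem pvFill_cons (cur : String × Int) (lab : Option (String × Int))
    (rest : List (Option (String × Int))) :
    pvFill cur (lab :: rest)
      = ((lab.getD cur).1 :: (pvFill (lab.getD cur) rest).1,
         (lab.getD cur).2 :: (pvFill (lab.getD cur) rest).2) := rfl

theorem pvOptBreak_none (bandwidth percentage_b : List Int) (i : Int)
    (hc : pvClassify bandwidth percentage_b i = none) :
    pvOptBreak bandwidth percentage_b i = [] := by
  unfold pvOptBreak; rw [hc]

theorem pvOptBreak_some (bandwidth percentage_b : List Int) (i : Int) (s : String) (k : Int)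
    (hc : pvClassify bandwidth percentage_b i = some (s, k)) :
    pvOptBreak bandwidth percentage_b i = [(i, s, k)] := by
  unfold pvOptBreak; rw [hc]

-- peel one position off an expansion whose breaks all start at ≥ k + 1
theorem pvExpand_cons (cur : String × Int) (k n : Int)
    (bs : List (Int × String × Int)) (hn : k + 1 ≤ n) (hbs : ∀ b ∈ bs, k + 1 ≤ b.1) :
    pvExpand cur k bs n
      = (cur.1 :: (pvExpand cur (k + 1) bs n).1, cur.2 :: (pvExpand cur (k + 1) bs n).2) := by
  cases bs with
  | nil =>
    unfold pvExpand
    have h1 : (n - k).toNat = (n - (k + 1)).toNat + 1 := by omega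
    simp [h1, List.replicate_succ]
  | cons b bs' =>
    obtain ⟨j, s, kk⟩ := b
    have hj : k + 1 ≤ j := hbs _ (List.mem_cons_self)
    unfold pvExpand
    have h1 : (j - k).toNat = (j - (k + 1)).toNat + 1 := by omega
    simp [h1, List.replicate_succ]

-- a break at the current position replaces the carried state without emitting anything
theorem pvExpand_self (cur : String × Int) (k : Int) (s : String) (kk n : Int)
    (bs : List (Int × String × Int)) :
    pvExpand cur k ((k, s, kk) :: bs) n = pvExpand (s, kk) k bs n := by
  have h0 : (k - k).toNat = 0 := by omega
  cases bs with
  | nil =>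
    unfold pvExpand; simp only [h0, List.replicate_zero, List.nil_append]
    rfl
  | cons b bs' =>
    obtain ⟨j, s1, k1⟩ := b
    unfold pvExpand; simp only [h0, List.replicate_zero, List.nil_append]
    rfl

-- the forward-fill of the labels from k equals the expansion of the change points from k
theorem pvFill_eq_expand (bandwidth percentage_b : List Int) :
    ∀ (m : Nat) (k : Int), 1 ≤ k → (bandwidth.length : Int) - k = m →
    ∀ (cur : String × Int),
    pvFill cur ((PySem.List.pyRange k (bandwidth.length : Int) 1).map
        (pvClassify bandwidth percentage_b))
      = pvExpand cur k ((PySem.List.pyRange k (bandwidth.length : Int) 1).flatMap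
        (pvOptBreak bandwidth percentage_b)) (bandwidth.length : Int) := by
  intro m
  induction m with
  | zero =>
    intro k hk hm cur
    rw [PySem.List.pyRange_one_eq_nil (by omega)]
    unfold pvFill pvExpand
    have h0 : ((bandwidth.length : Int) - k).toNat = 0 := by omega
    simp [h0]
  | succ m ih =>
    intro k hk hm cur
    rw [PySem.List.pyRange_one_cons (a := k) (b := (bandwidth.length : Int)) (by omega)]
    simp only [List.map_cons, List.flatMap_cons]
    have hmem : ∀ b ∈ (PySem.List.pyRange (k + 1) (bandwidth.length : Int) 1).flatMap
        (pvOptBreak bandwidth percentage_b), k + 1 ≤ b.1 :=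
      fun b hb => pvOptBreak_mem_ge bandwidth percentage_b (k + 1) _ b hb
    cases hc : pvClassify bandwidth percentage_b k with
    | none =>
      rw [pvOptBreak_none bandwidth percentage_b k hc, pvFill_cons]
      simp only [Option.getD_none, List.nil_append]
      rw [ih (k + 1) (by omega) (by omega) cur,
        pvExpand_cons cur k _ _ (by omega) hmem]
    | some sk =>
      obtain ⟨s, kk⟩ := sk
      rw [pvOptBreak_some bandwidth percentage_b k s kk hc, pvFill_cons]
      simp only [Option.getD_some, List.singleton_append]
      rw [ih (k + 1) (by omega) (by omega) (s, kk),
        pvExpand_self cur k s kk,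
        pvExpand_cons (s, kk) k _ _ (by omega) hmem]

-- the zip-with-next fold is the expansion recursion
theorem pvZip_eq_expand (n : Int) :
    ∀ (bs : List (Int × String × Int)) (i0 : Int) (s0 : String) (k0 : Int)
      (accS : List String) (accI : List Int),
    (((i0, s0, k0) :: bs).zip (bs.map (·.1) ++ [n])).foldl pvRunStep (accS, accI)
      = (accS ++ (pvExpand (s0, k0) i0 bs n).1, accI ++ (pvExpand (s0, k0) i0 bs n).2) := by
  intro bs
  induction bs with
  | nil =>
    intro i0 s0 k0 accS accI
    simp [pvRunStep, pvExpand]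
  | cons b bs' ih =>
    obtain ⟨j, s, k⟩ := b
    intro i0 s0 k0 accS accI
    simp only [List.map_cons, List.cons_append, List.zip_cons_cons, List.foldl_cons]
    rw [show pvRunStep (accS, accI) ((i0, s0, k0), j)
        = (accS ++ List.replicate (j - i0).toNat s0, accI ++ List.replicate (j - i0).toNat k0)
      from rfl]
    rw [ih j s k (accS ++ List.replicate (j - i0).toNat s0)
      (accI ++ List.replicate (j - i0).toNat k0)]
    rw [show pvExpand (s0, k0) i0 ((j, s, k) :: bs') n
        = (List.replicate (j - i0).toNat s0 ++ (pvExpand (s, k) j bs' n).1,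
           List.replicate (j - i0).toNat k0 ++ (pvExpand (s, k) j bs' n).2) from rfl]
    simp

-- ===== VERDICT (by name: the statement is the Claim_ definition above) =====
theorem get_simple_state_transitions_spec : Claim_equal_get_simple_state_transitions := by
  unfold Claim_equal_get_simple_state_transitions
  intro bandwidth percentage_b _ hpre
  unfold Spec_get_simple_state_transitions
  unfold get_simple_state_transitions get_simple_state_transitions_alt
  obtain ⟨hne, -⟩ := hpre
  have hlen : 0 < bandwidth.length := List.length_pos_iff.mpr hne
  simp only [PySem.List.len_eq]
  -- A: peel off i = 0 (both ifs false there: bandwidth[0] = temp_bandwidth)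
  rw [PySem.List.pyRange_one_cons (by exact_mod_cast hlen)]
  simp only [List.foldl_cons]
  have h0 : pvAStep bandwidth percentage_b
      (PySem.List.pyGetD bandwidth 0 0, "Start", (0 : Int), [], []) 0
      = (PySem.List.pyGetD bandwidth 0 0, "Start", (0 : Int), ["Start"], [(0 : Int)]) := by
    simp [pvAStep]
  rw [h0]
  have h01 : PySem.List.pyGetD bandwidth 0 0 = PySem.List.pyGetD bandwidth (1 - 1) 0 := by norm_num
  rw [h01]
  have hA := pvLoop_eq_fill bandwidth percentage_b (bandwidth.length - 1) 1 (by omega) (by omega)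
    ("Start", (0 : Int)) ["Start"] [(0 : Int)]
  simp only at hA
  -- B: the breaks list is (0, Start, 0) followed by the change points from index 1
  have hB : (PySem.List.pyRange 1 (bandwidth.length : Int) 1).foldl
      (pvBreakStep bandwidth percentage_b) [((0 : Int), "Start", (0 : Int))]
      = ((0 : Int), "Start", (0 : Int)) ::
        (PySem.List.pyRange 1 (bandwidth.length : Int) 1).flatMap
          (pvOptBreak bandwidth percentage_b) := by
    rw [PySem.List.foldl_congr_mem _ (pvBreakStep bandwidth percentage_b)
      (fun acc x => acc ++ pvOptBreak bandwidth percentage_b x) _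
      (fun acc x _ => pvBreakStep_eq_append bandwidth percentage_b acc x)]
    rw [PySem.List.foldl_append_eq_flatMap]
    simp
  rw [hB]
  simp only [List.drop_succ_cons, List.drop_zero]
  rw [pvZip_eq_expand]
  have hmem : ∀ b ∈ (PySem.List.pyRange 1 (bandwidth.length : Int) 1).flatMap
      (pvOptBreak bandwidth percentage_b), (0 : Int) + 1 ≤ b.1 := by
    intro b hb
    have := pvOptBreak_mem_ge bandwidth percentage_b 1 _ b hb
    omega
  rw [pvExpand_cons ("Start", (0 : Int)) 0 _ _ (by omega) hmem]
  have hF := pvFill_eq_expand bandwidth percentage_b (bandwidth.length - 1) 1 (by omega) (by omega)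
    ("Start", (0 : Int))
  rw [hF] at hA
  simp only [List.nil_append]
  norm_num at hA ⊢
  rw [hA]
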